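-- pv_equiv track=rewrite | github.com/yhs3434/Algorithms | noodle.py | solution
-- ===== SOURCE A (Python) =====
-- import heapq
--
-- def solution(stock, dates, supplies, k):
--     answer = 0
--     heap = []
--     dates.reverse()
--     supplies.reverse()
--     while stock<k:
--         while len(dates)>0 and dates[-1] <= stock:
--             heapq.heappush(heap, -supplies.pop())
--             dates.pop()
--         stock += (-heapq.heappop(heap))
--         answer += 1
--
--     return answer
-- ===== SOURCE B (Python) =====
-- def solution(stock, dates, supplies, k):
--     # heapq replaced by a plain list: linear scan for the first maximum, positional pop.
--     answer = 0
--     available = []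
--     dates.reverse()
--     supplies.reverse()
--     while stock < k:
--         while dates and dates[-1] <= stock:
--             dates.pop()
--             available.append(supplies.pop())
--         best = 0
--         for i in range(1, len(available)):
--             if available[i] > available[best]:
--                 best = i
--         stock += available.pop(best)
--         answer += 1
--     return answer
-- ===== Notes on version B (the rewrite author's own statement) =====
-- stated objective: alternative
-- what changed: Replaces the heapq priority queue of negated supplies with a plain list plus a linear first-maximum scan and positional pop; the outer greedy loop and the in-place reversal/popping of dates/supplies are kept.
-- outside the precondition, e.g. on solution(0, [0, 99], [5], 3): A returns 1, B returns 1; on solution(0, [0, 0], [-1, 10], 5): A returns 1, B returns 1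
import Mathlib
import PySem

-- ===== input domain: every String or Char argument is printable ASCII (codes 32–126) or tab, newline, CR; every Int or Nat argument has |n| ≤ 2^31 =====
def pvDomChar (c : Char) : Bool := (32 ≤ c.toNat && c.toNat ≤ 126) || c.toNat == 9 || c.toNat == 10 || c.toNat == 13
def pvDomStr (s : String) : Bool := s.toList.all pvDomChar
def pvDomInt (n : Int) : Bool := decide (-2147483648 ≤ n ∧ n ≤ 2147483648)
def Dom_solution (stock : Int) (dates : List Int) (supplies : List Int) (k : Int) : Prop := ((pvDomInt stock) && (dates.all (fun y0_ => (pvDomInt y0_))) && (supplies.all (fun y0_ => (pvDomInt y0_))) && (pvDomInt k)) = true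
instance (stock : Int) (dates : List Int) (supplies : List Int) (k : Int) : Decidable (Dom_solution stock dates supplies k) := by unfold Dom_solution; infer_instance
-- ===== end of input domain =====

-- B replaces A's heapq priority queue by a plain list with a linear first-maximum scan and a
-- positional pop (alternative data structure, same greedy loop). Equivalence is about the RETURN
-- value only: both Pythons mutate dates/supplies in place identically on every returning input.
-- Both Pythons do `xs.reverse()` and then pop from the END of the reversed list; the ports render
-- that pair exactly as consuming the ORIGINAL list front-to-back (same elements, same order).
-- Python raises (IndexError) where the ports return the junk value 0; Pre_solution excludes those.

-- ===== PORT A =====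
-- heapq observable behaviour (only push / pop-min are used, and only the popped VALUES are ever
-- observed): modelled exactly by an ordered insert with pop = head (the minimum).
def heapPush (heap : List Int) (x : Int) : List Int := List.orderedInsert (· ≤ ·) x heap

-- inner `while len(dates)>0 and dates[-1] <= stock: heappush(heap, -supplies.pop()); dates.pop()`
-- none = Python raises IndexError (supplies exhausted while a date is still unlockable)
def fillA (stock : Int) : List Int → List Int → List Int → Option (List Int × List Int × List Int)
  | d :: ds, supplies, heap =>
    if d ≤ stock then
      match supplies with
      | s :: ss => fillA stock ds ss (heapPush heap (-s))
      | [] => none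
    else some (d :: ds, supplies, heap)
  | [], supplies, heap => some ([], supplies, heap)

-- outer `while stock < k`; fuel supplies.length + 1 is enough: every iteration that loops again
-- removes one element from the supplies/heap pool; 0 marks the branches where Python raises.
def goA (k : Int) : Nat → Int → List Int → List Int → List Int → Int → Int
  | 0, _, _, _, _, _ => 0
  | fuel + 1, stock, dates, supplies, heap, answer =>
    if stock < k then
      match fillA stock dates supplies heap with
      | none => 0
      | some (dates', supplies', heap') =>
        match heap' with
        | [] => 0  -- heappop from an empty heap: IndexError
        | m :: rest => goA k fuel (stock + (-m)) dates' supplies' rest (answer + 1)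
    else answer

def solution (stock : Int) (dates : List Int) (supplies : List Int) (k : Int) : Int :=
  goA k (supplies.length + 1) stock dates supplies [] 0

-- ===== PORT B =====
-- inner while of B: same unlock loop, but the supply goes to the END of the plain list `available`
def fillB (stock : Int) : List Int → List Int → List Int → Option (List Int × List Int × List Int)
  | d :: ds, supplies, avail =>
    if d ≤ stock then
      match supplies with
      | s :: ss => fillB stock ds ss (avail ++ [s])
      | [] => none
    else some (d :: ds, supplies, avail)
  | [], supplies, avail => some ([], supplies, avail)

-- `best = 0; for i in range(1, len(available)): if available[i] > available[best]: best = i`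
-- carries (current best value, current best index); i is the index of the head of the remaining list
def scanBest : List Int → Nat → Int → Nat → Int × Nat
  | [], _, bv, best => (bv, best)
  | x :: xs, i, bv, best => if bv < x then scanBest xs (i + 1) x i else scanBest xs (i + 1) bv best

-- `available.pop(best)`; none = IndexError (pop(0) from an empty list)
def popBest? : List Int → Option (Int × List Int)
  | [] => none
  | a :: rest =>
    let r := scanBest rest 1 a 0
    some (r.1, (a :: rest).eraseIdx r.2)

def goB (k : Int) : Nat → Int → List Int → List Int → List Int → Int → Int
  | 0, _, _, _, _, _ => 0
  | fuel + 1, stock, dates, supplies, avail, answer =>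
    if stock < k then
      match fillB stock dates supplies avail with
      | none => 0
      | some (dates', supplies', avail') =>
        match popBest? avail' with
        | none => 0
        | some (v, avail'') => goB k fuel (stock + v) dates' supplies' avail'' (answer + 1)
    else answer

def solution_alt (stock : Int) (dates : List Int) (supplies : List Int) (k : Int) : Int :=
  goB k (supplies.length + 1) stock dates supplies [] 0

-- ===== PRECONDITION & SPEC =====
-- Pre_solution is a closed-form sufficient condition (reach k by taking the supplies in date order,
-- with enough supplies for the dates) for the Python to return without raising IndexError. It
-- excludes every raising input, and also some inputs where A does return — lists of unequal length
-- whose surplus dates never unlock, and recoveries where a large later supply follows a negative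
-- one — on all of which B returns exactly A's value as well.
def preCheck (stock : Int) (dates : List Int) (supplies : List Int) (k : Int) : Bool :=
  decide (k ≤ stock) ||
  (decide (dates.length ≤ supplies.length) &&
    (List.range (dates.length + 1)).any (fun j =>
      decide (1 ≤ j) && decide (k ≤ stock + (supplies.take j).sum) &&
      (List.range j).all (fun i => decide (dates.getD i 0 ≤ stock + (supplies.take i).sum))))

def Pre_solution (stock : Int) (dates : List Int) (supplies : List Int) (k : Int) : Prop :=
  preCheck stock dates supplies k = true
instance (stock : Int) (dates : List Int) (supplies : List Int) (k : Int) : Decidable (Pre_solution stock dates supplies k) := by unfold Pre_solution; infer_instance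

def pvWitness_solution : Int × List Int × List Int × Int := (0, [0], [5], 3)

def Spec_solution (stock : Int) (dates : List Int) (supplies : List Int) (k : Int) (out : Int) : Prop := out = solution_alt stock dates supplies k
instance (stock : Int) (dates : List Int) (supplies : List Int) (k : Int) (out : Int) : Decidable (Spec_solution stock dates supplies k out) := by unfold Spec_solution; infer_instance

-- ===== CLAIM (what is proved, stated in full; the proofs are below) =====
def Claim_equal_solution : Prop := ∀ (stock : Int) (dates : List Int) (supplies : List Int) (k : Int), Dom_solution stock dates supplies k → Pre_solution stock dates supplies k → Spec_solution stock dates supplies k (solution stock dates supplies k)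

-- ===== LEMMAS AND PROOFS =====

-- the scan returns a value present at the returned index and an upper bound of the whole list
theorem scanBest_spec (xs : List Int) : ∀ (pref : List Int) (bv : Int) (best : Nat),
    pref[best]? = some bv → (∀ x ∈ pref, x ≤ bv) →
    (pref ++ xs)[(scanBest xs pref.length bv best).2]? = some (scanBest xs pref.length bv best).1
      ∧ ∀ x ∈ pref ++ xs, x ≤ (scanBest xs pref.length bv best).1 := by
  induction xs with
  | nil =>
    intro pref bv best h1 h2
    simpa [scanBest] using ⟨h1, h2⟩
  | cons x xs ih =>
    intro pref bv best h1 h2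
    by_cases hlt : bv < x
    · have h1' : (pref ++ [x])[pref.length]? = some x := by simp
      have h2' : ∀ y ∈ pref ++ [x], y ≤ x := by
        intro y hy
        rcases List.mem_append.mp hy with hy | hy
        · exact le_of_lt (lt_of_le_of_lt (h2 y hy) hlt)
        · rw [List.mem_singleton.mp hy]
      have h := ih (pref ++ [x]) x pref.length h1' h2'
      rw [List.append_assoc] at h
      simp only [List.length_append, List.length_singleton, List.singleton_append] at h
      simpa [scanBest, hlt] using h
    · have hb : best < pref.length := (List.getElem?_eq_some_iff.mp h1).1
      have h1' : (pref ++ [x])[best]? = some bv := by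
        rw [List.getElem?_append_left hb]; exact h1
      have h2' : ∀ y ∈ pref ++ [x], y ≤ bv := by
        intro y hy
        rcases List.mem_append.mp hy with hy | hy
        · exact h2 y hy
        · rw [List.mem_singleton.mp hy]; omega
      have h := ih (pref ++ [x]) bv best h1' h2'
      rw [List.append_assoc] at h
      simp only [List.length_append, List.length_singleton, List.singleton_append] at h
      simpa [scanBest, hlt] using h

-- popBest? on a nonempty list returns a maximum and the list minus one occurrence of it
theorem popBest_spec (l : List Int) (h : l ≠ []) :
    ∃ v l', popBest? l = some (v, l') ∧ (∀ x ∈ l, x ≤ v) ∧ (v :: l').Perm l := by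
  match l with
  | a :: rest =>
    have h1 : [a][0]? = some a := rfl
    have h2 : ∀ x ∈ [a], x ≤ a := by
      intro x hx; rw [List.mem_singleton.mp hx]
    have hs := scanBest_spec rest [a] a 0 h1 h2
    simp only [List.length_singleton, List.singleton_append] at hs
    obtain ⟨hget, hub⟩ := hs
    obtain ⟨hlt, hval⟩ := List.getElem?_eq_some_iff.mp hget
    refine ⟨_, _, rfl, hub, ?_⟩
    rw [← hval]
    exact List.getElem_cons_eraseIdx_perm hlt

-- the heap and the plain list stay related through the unlock loop
theorem fill_rel (stock : Int) : ∀ (dates supplies heap avail : List Int),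
    List.Pairwise (· ≤ ·) heap → heap.Perm (avail.map (fun s => -s)) →
    (fillA stock dates supplies heap = none ∧ fillB stock dates supplies avail = none) ∨
    ∃ d' s' h' a', fillA stock dates supplies heap = some (d', s', h') ∧
      fillB stock dates supplies avail = some (d', s', a') ∧
      List.Pairwise (· ≤ ·) h' ∧ h'.Perm (a'.map (fun s => -s)) := by
  intro dates
  induction dates with
  | nil =>
    intro supplies heap avail hs hp
    exact Or.inr ⟨_, _, _, _, rfl, rfl, hs, hp⟩
  | cons d ds ih =>
    intro supplies heap avail hs hp
    by_cases hd : d ≤ stock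
    · match supplies with
      | [] => simp [fillA, fillB, hd]
      | s :: ss =>
        have hs' : List.Pairwise (· ≤ ·) (heapPush heap (-s)) := hs.orderedInsert _ _
        have hp' : (heapPush heap (-s)).Perm ((avail ++ [s]).map (fun t => -t)) := by
          refine (List.perm_orderedInsert _ _ _).trans ?_
          simp only [List.map_append, List.map_cons, List.map_nil]
          exact (hp.cons _).trans (List.perm_append_singleton _ _).symm
        have h := ih ss (heapPush heap (-s)) (avail ++ [s]) hs' hp'
        simpa only [fillA, fillB, if_pos hd] using h
    · exact Or.inr ⟨d :: ds, supplies, heap, avail, by simp [fillA, hd], by simp [fillB, hd], hs, hp⟩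

-- the two greedy loops return the same answer whenever heap and available list hold
-- the same (negated) multiset of supplies
theorem go_rel (k : Int) : ∀ (fuel : Nat) (stock : Int) (dates supplies heap avail : List Int)
    (answer : Int), List.Pairwise (· ≤ ·) heap → heap.Perm (avail.map (fun s => -s)) →
    goA k fuel stock dates supplies heap answer = goB k fuel stock dates supplies avail answer := by
  intro fuel
  induction fuel with
  | zero => intros; rfl
  | succ fuel ih =>
    intro stock dates supplies heap avail answer hs hp
    by_cases hk : stock < k
    · rcases fill_rel stock dates supplies heap avail hs hp with
        ⟨hA, hB⟩ | ⟨d', s', h', a', hA, hB, hs', hp'⟩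
      · simp [goA, goB, hk, hA, hB]
      · match h', hs', hp' with
        | [], _, hp' =>
          have ha' : a' = [] := List.map_eq_nil_iff.mp hp'.symm.eq_nil
          simp [goA, goB, hk, hA, hB, ha', popBest?]
        | m :: rest, hs', hp' =>
          have hne : a' ≠ [] := by
            intro h0
            rw [h0] at hp'
            exact absurd hp'.eq_nil (by simp)
          obtain ⟨v, l', hpop, hub, hperm⟩ := popBest_spec a' hne
          have hvmem : v ∈ a' := hperm.mem_iff.mp (List.mem_cons_self ..)
          have hnv : -v ∈ m :: rest := hp'.mem_iff.mpr (List.mem_map_of_mem hvmem)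
          have hmle : m ≤ -v := by
            rcases List.mem_cons.mp hnv with h0 | h0
            · omega
            · exact List.rel_of_pairwise_cons hs' h0
          have hmmem : m ∈ a'.map (fun s => -s) := hp'.mem_iff.mp (List.mem_cons_self ..)
          obtain ⟨u, hu, hum⟩ := List.mem_map.mp hmmem
          have hmv : m = -v := by have := hub u hu; omega
          have hrest : rest.Perm (l'.map (fun s => -s)) := by
            have h1 : (m :: rest).Perm (m :: l'.map (fun s => -s)) := by
              refine hp'.trans ?_
              refine (hperm.map (fun s => -s)).symm.trans ?_
              rw [List.map_cons, ← hmv]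
            exact (List.perm_cons m).mp h1
          have hrec := ih (stock + v) d' s' rest l' (answer + 1) hs'.of_cons hrest
          have hstock : stock + -m = stock + v := by omega
          simp only [goA, goB, hk, hA, hB, hpop, hstock]
          exact hrec
    · simp [goA, goB, hk]

-- ===== VERDICT (by name: the statement is the Claim_ definition above) =====
theorem solution_spec : Claim_equal_solution := by
  intro stock dates supplies k _ _
  unfold Spec_solution solution solution_alt
  exact go_rel k _ stock dates supplies [] [] 0 List.Pairwise.nil (by simp)
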